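-- pv_equiv track=rewrite | github.com/nprobert/j2735_tools | classes/p1609dot2/dot2oer.py | oer_parse_length
-- ===== SOURCE A (Python) =====
-- def oer_parse_length(pkt):
--   val = pkt[0]
--   leng = 1
--   if val & 0x80:
--     n = val & 0x7f
--     val = 0
--     while n:
--       val = val << 8
--       val = val | (pkt[leng] & 0xff)
--       leng += 1
--       n -= 1
--
--   return (val, leng)
-- ===== SOURCE B (Python) =====
-- def oer_parse_length(pkt):
--     val = pkt[0]
--     if not (val & 0x80):
--         return (val, 1)
--     n = val & 0x7f
--     body = pkt[1:1 + n]
--     val = sum((b & 0xff) << (8 * i) for i, b in enumerate(reversed(body)))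
--     return (val, 1 + n)
-- ===== Notes on version B (the rewrite author's own statement) =====
-- stated objective: alternative
-- what changed: Replaces A's sequential shift-or accumulation with manual index bookkeeping by slicing the length body once and summing positionally weighted byte terms over enumerate(reversed(body)); Pre_ excludes the empty buffer and truncated long-form buffers, on which A raises IndexError.
import Mathlib
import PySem

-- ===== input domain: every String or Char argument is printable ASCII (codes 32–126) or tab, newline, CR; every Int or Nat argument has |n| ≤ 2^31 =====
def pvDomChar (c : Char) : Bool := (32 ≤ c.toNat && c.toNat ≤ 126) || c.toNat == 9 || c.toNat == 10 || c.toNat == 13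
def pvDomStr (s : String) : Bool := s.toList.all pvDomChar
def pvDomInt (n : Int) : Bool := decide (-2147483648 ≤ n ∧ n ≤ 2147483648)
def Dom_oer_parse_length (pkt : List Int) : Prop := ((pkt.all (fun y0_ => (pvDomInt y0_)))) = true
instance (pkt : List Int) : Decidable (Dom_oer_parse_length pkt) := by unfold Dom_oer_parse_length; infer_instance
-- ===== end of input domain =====

-- B replaces A's sequential shift-or accumulation with manual index bookkeeping by slicing the
-- length body once and summing positionally weighted byte terms over enumerate(reversed(body)) (alternative decomposition).

-- ===== PORT A =====
-- A's while loop: n counts down, leng indexes forward; pkt[leng] via pyGetD (in range under Pre_).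
def oerLoopA (pkt : List Int) (val : Int) (leng : Int) : Nat → Int × Int
  | 0 => (val, leng)
  | n + 1 =>
      oerLoopA pkt (PySem.Int.bor (val <<< 8) (PySem.Int.band (PySem.List.pyGetD pkt leng 0) 0xff)) (leng + 1) n

def oer_parse_length (pkt : List Int) : Int × Int :=
  let val := PySem.List.pyGetD pkt 0 0
  if PySem.Int.band val 0x80 ≠ 0 then
    oerLoopA pkt 0 1 (PySem.Int.band val 0x7f).toNat
  else
    (val, 1)

-- ===== PORT B =====
def oer_parse_length_alt (pkt : List Int) : Int × Int :=
  let val := PySem.List.pyGetD pkt 0 0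
  if PySem.Int.band val 0x80 = 0 then
    (val, 1)
  else
    let n := (PySem.Int.band val 0x7f).toNat
    let body := PySem.List.slice pkt (some 1) (some (1 + (n : Int)))
    (((PySem.List.enumerate body.reverse).map
        (fun p => PySem.Int.band p.2 0xff <<< (8 * p.1).toNat)).sum,
     1 + (n : Int))

-- ===== PRECONDITION & SPEC =====
-- A raises IndexError on the empty list and on a long-form header whose body is truncated;
-- Pre_ excludes exactly those inputs.
def Pre_oer_parse_length (pkt : List Int) : Prop :=
  match pkt with
  | [] => False
  | v :: rest => PySem.Int.band v 0x80 ≠ 0 → PySem.Int.band v 0x7f ≤ rest.length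
instance (pkt : List Int) : Decidable (Pre_oer_parse_length pkt) := by
  unfold Pre_oer_parse_length
  cases pkt <;> infer_instance

def pvWitness_oer_parse_length : List Int := [130, 1, 44]

def Spec_oer_parse_length (pkt : List Int) (out : Int × Int) : Prop := out = oer_parse_length_alt pkt
instance (pkt : List Int) (out : Int × Int) : Decidable (Spec_oer_parse_length pkt out) := by
  unfold Spec_oer_parse_length; infer_instance

-- ===== CLAIM (what is proved, stated in full; the proofs are below) =====
def Claim_equal_oer_parse_length : Prop := ∀ (pkt : List Int), Dom_oer_parse_length pkt → Pre_oer_parse_length pkt → Spec_oer_parse_length pkt (oer_parse_length pkt)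


-- ===== LEMMAS AND PROOFS =====

-- Python b & 0xff lands in [0, 256).
lemma band255_bounds (b : Int) : 0 ≤ PySem.Int.band b 0xff ∧ PySem.Int.band b 0xff < 256 := by
  unfold PySem.Int.band
  have h1 : b.toNat &&& (255 : Int).toNat < 256 :=
    Nat.and_lt_two_pow b.toNat (by norm_num : (255 : Int).toNat < 2 ^ 8)
  have h2 : (255 : Int).toNat &&& (-b - 1).toNat ≤ (255 : Int).toNat := Nat.and_le_left
  split_ifs with ha hb hb <;> simp_all <;> omega

-- Disjoint-bit or is addition: (a << 8) | m = 256*a + m for 0 ≤ a, 0 ≤ m < 256.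
lemma bor_shift_add (a m : Int) (ha : 0 ≤ a) (hm : 0 ≤ m) (hm' : m < 256) :
    PySem.Int.bor (a <<< 8) m = 256 * a + m := by
  have hsh : a <<< (8 : Int) = a * 256 := by
    have h := Int.shiftLeft_eq_mul_pow a 8
    norm_num at h
    exact h
  have hnn : 0 ≤ a <<< (8 : Int) := by rw [hsh]; positivity
  rw [PySem.Int.bor_of_nonneg hnn hm]
  have htn : (a <<< (8 : Int)).toNat = a.toNat <<< 8 := by
    rw [hsh, Nat.shiftLeft_eq]; omega
  have hmlt : m.toNat < 2 ^ 8 := by omega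
  have hor := Nat.shiftLeft_add_eq_or_of_lt hmlt a.toNat
  rw [htn, ← hor, Nat.shiftLeft_eq]
  have h256 : (2 : Nat) ^ 8 = 256 := by norm_num
  omega

-- Positional value of a byte list, least-significant byte first.
def hval : List Int → Int
  | [] => 0
  | b :: t => PySem.Int.band b 0xff + 256 * hval t

lemma hval_append (xs : List Int) (b : Int) :
    hval (xs ++ [b]) = hval xs + PySem.Int.band b 0xff * 256 ^ xs.length := by
  induction xs with
  | nil => simp [hval]
  | cons x t ih => simp only [List.cons_append, hval, ih, List.length_cons]; ring

-- A's fold equals the positional value of the reversed list.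
lemma foldl_shift_or_eq (l : List Int) : ∀ (a : Int), 0 ≤ a →
    l.foldl (fun v b => PySem.Int.bor (v <<< 8) (PySem.Int.band b 0xff)) a
      = a * 256 ^ l.length + hval l.reverse := by
  induction l with
  | nil => intro a _; simp [hval]
  | cons b t ih =>
    intro a ha
    obtain ⟨hm0, hm1⟩ := band255_bounds b
    have hstep : PySem.Int.bor (a <<< 8) (PySem.Int.band b 0xff)
        = 256 * a + PySem.Int.band b 0xff := bor_shift_add _ _ ha hm0 hm1
    simp only [List.foldl_cons, hstep]
    rw [ih _ (by omega)]
    rw [List.reverse_cons, hval_append]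
    simp only [List.length_cons, List.length_reverse]
    ring

-- B's enumerate-map-sum equals 256^s times the positional value.
lemma enum_sum_eq (xs : List Int) : ∀ (s : Nat),
    ((PySem.List.enumerate xs (s : Int)).map
        (fun p => PySem.Int.band p.2 0xff <<< (8 * p.1).toNat)).sum
      = 256 ^ s * hval xs := by
  induction xs with
  | nil => intro s; simp [PySem.List.enumerate_nil, hval]
  | cons b t ih =>
    intro s
    rw [PySem.List.enumerate_cons]
    have hcast : ((s : Int) + 1) = (((s + 1 : Nat)) : Int) := by push_cast; ring
    simp only [List.map_cons, List.sum_cons, hcast, ih (s + 1)]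
    have harg : ((8 * (s : Int)).toNat : Int) = ((8 * s : Nat) : Int) := by omega
    have hsh : PySem.Int.band b 0xff <<< (((8 * (s : Int)).toNat : Nat) : Int)
        = PySem.Int.band b 0xff * 256 ^ s := by
      rw [harg, Int.shiftLeft_eq_mul_pow]
      push_cast
      rw [pow_mul]
      norm_num
    rw [hsh]
    simp only [hval]
    ring

-- A's loop, started at index k with n bytes available, folds exactly over take n of drop k.
lemma oerLoopA_eq (pkt : List Int) : ∀ (n k : Nat) (val : Int),
    k + n ≤ pkt.length →
    oerLoopA pkt val (k : Int) n =
      (((pkt.drop k).take n).foldl (fun a b => PySem.Int.bor (a <<< 8) (PySem.Int.band b 0xff)) val,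
       (k : Int) + n) := by
  intro n
  induction n with
  | zero => intro k val _; simp [oerLoopA]
  | succ m ih =>
    intro k val h
    have hk : k < pkt.length := by omega
    have hget : PySem.List.pyGetD pkt (k : Int) 0 = pkt[k] :=
      PySem.List.pyGetD_ofNat pkt k 0 hk
    have hdrop : pkt.drop k = pkt[k] :: pkt.drop (k + 1) := by
      simpa using (List.drop_eq_getElem_cons hk)
    have hrec := ih (k + 1) (PySem.Int.bor (val <<< 8) (PySem.Int.band pkt[k] 0xff)) (by omega)
    simp only [oerLoopA, hget]
    rw [show (k : Int) + 1 = ((k + 1 : Nat) : Int) by push_cast; ring, hrec, hdrop]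
    refine Prod.ext ?_ ?_
    · simp only [List.take_succ_cons, List.foldl_cons]
    · simp; ring

-- ===== VERDICT =====
theorem oer_parse_length_spec : Claim_equal_oer_parse_length := by
  intro pkt _ hpre
  unfold Spec_oer_parse_length
  cases pkt with
  | nil => exact hpre.elim
  | cons v rest =>
    have hpre' : PySem.Int.band v 0x80 ≠ 0 → PySem.Int.band v 0x7f ≤ rest.length := hpre
    unfold oer_parse_length oer_parse_length_alt
    simp only [PySem.List.pyGetD_zero_cons]
    by_cases hb : PySem.Int.band v 0x80 ≠ 0
    · simp only [if_pos hb, if_neg hb]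
      have h0 : (0 : Int) ≤ PySem.Int.band v 0x7f := by
        rw [PySem.Int.band_comm]
        exact PySem.Int.band_nonneg_of_nonneg_left _ (by norm_num)
      set n : Nat := (PySem.Int.band v 0x7f).toNat with hn
      have hnle : n ≤ rest.length := by
        have := hpre' hb; omega
      have hloop := oerLoopA_eq (v :: rest) n 1 0 (by simp; omega)
      rw [show ((1 : Nat) : Int) = (1 : Int) by norm_num] at hloop
      rw [hloop]
      have hslice :
          PySem.List.slice (v :: rest) (some 1) (some (1 + (n : Int))) = rest.take n := by
        have := PySem.List.slice_natCast_add (xs := v :: rest) (j := 1) (n := n)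
        simpa using this
      rw [hslice]
      refine Prod.ext ?_ rfl
      simp only [List.drop_succ_cons, List.drop_zero]
      rw [foldl_shift_or_eq _ 0 le_rfl]
      rw [show ((0 : Int) = ((0 : Nat) : Int)) by norm_num] at *
      rw [enum_sum_eq (rest.take n).reverse 0]
      simp
    · simp [if_neg hb, not_not.mp hb]
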